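-- pv_equiv track=rewrite | github.com/Tencent/BlockFusion | drawtkinter.py | get_views
-- ===== SOURCE A (Python) =====
-- from math import ceil
--
-- def get_views(panorama_height, panorama_width, window_size=64, stride=32):
--     num_blocks_height = ceil((panorama_height - window_size) / stride) + 1
--     num_blocks_width = ceil((panorama_width - window_size) / stride) + 1
--     total_num_blocks = int(num_blocks_height * num_blocks_width)
--     views = [[] for _ in range(num_blocks_height)]
--     for i in range(num_blocks_height):
--         for j in range(num_blocks_width):
--             h_start = int(i  * stride)
--             h_end = h_start + window_size
--             w_start = int(j  * stride)
--             w_end = w_start + window_size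
--             views[i].append((h_start, h_end, w_start, w_end))
--     return views
-- ===== SOURCE B (Python) =====
-- from math import ceil
--
-- def get_views(panorama_height, panorama_width, window_size=64, stride=32):
--     num_blocks_height = ceil((panorama_height - window_size) / stride) + 1
--     num_blocks_width = ceil((panorama_width - window_size) / stride) + 1
--     # first row at h = 0; every later row is the previous row translated down by stride
--     row = [(0, window_size, j * stride, j * stride + window_size) for j in range(num_blocks_width)]
--     views = []
--     for _ in range(num_blocks_height):
--         views.append(row)
--         row = [(h0 + stride, h1 + stride, w0, w1) for (h0, h1, w0, w1) in row]
--     return views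
-- ===== Notes on version B (the rewrite author's own statement) =====
-- stated objective: alternative
-- what changed: Replaces the preallocate-then-mutate doubly-indexed loops with an incremental scheme: only the first row's coordinates are computed from column indices; each subsequent row is produced by translating the previous row by stride, so the row index and its multiplication disappear entirely.
import Mathlib
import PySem

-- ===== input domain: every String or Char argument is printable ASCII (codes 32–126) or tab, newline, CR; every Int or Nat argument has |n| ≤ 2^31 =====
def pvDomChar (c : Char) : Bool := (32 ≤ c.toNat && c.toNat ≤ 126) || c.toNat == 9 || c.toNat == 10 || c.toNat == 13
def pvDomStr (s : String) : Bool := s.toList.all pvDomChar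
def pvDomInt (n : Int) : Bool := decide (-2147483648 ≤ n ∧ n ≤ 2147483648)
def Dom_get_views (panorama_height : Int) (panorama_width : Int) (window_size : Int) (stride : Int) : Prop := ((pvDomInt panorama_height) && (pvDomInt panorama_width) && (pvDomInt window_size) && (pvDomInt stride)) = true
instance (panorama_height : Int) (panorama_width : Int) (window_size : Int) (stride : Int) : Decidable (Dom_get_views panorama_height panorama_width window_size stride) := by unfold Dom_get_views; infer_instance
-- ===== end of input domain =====

-- B replaces the doubly-indexed preallocate-and-mutate loops with an incremental scheme:
-- only the first row is computed from column indices, each later row is the previous row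
-- translated by stride (objective: alternative algorithm, same asymptotic cost).

-- ===== PORT A =====
-- math.ceil((a)/b) on ints of this magnitude is exactly ceiling division: -((-a) // b).
-- Exact on Dom: |a| ≤ 2^33 fits a float and the float quotient can never round across an integer.
def pyCeilDiv (a b : Int) : Int := -(PySem.Int.floordiv (-a) b)

-- views[i].append(x): i is a valid non-negative index whenever A executes it
def pvAppendAt (xs : List (List (Int × Int × Int × Int))) (i : Int)
    (x : Int × Int × Int × Int) : List (List (Int × Int × Int × Int)) :=
  xs.set i.toNat (xs.getD i.toNat [] ++ [x])

def get_views (panorama_height : Int) (panorama_width : Int) (window_size : Int) (stride : Int) : List (List (Int × Int × Int × Int)) :=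
  let num_blocks_height := pyCeilDiv (panorama_height - window_size) stride + 1
  let num_blocks_width := pyCeilDiv (panorama_width - window_size) stride + 1
  let views : List (List (Int × Int × Int × Int)) :=
    (PySem.List.pyRange 0 num_blocks_height 1).map (fun _ => [])
  (PySem.List.pyRange 0 num_blocks_height 1).foldl (fun views i =>
    (PySem.List.pyRange 0 num_blocks_width 1).foldl (fun views j =>
      let h_start := i * stride
      let h_end := h_start + window_size
      let w_start := j * stride
      let w_end := w_start + window_size
      pvAppendAt views i (h_start, h_end, w_start, w_end)) views) views

-- ===== PORT B =====
def get_views_alt (panorama_height : Int) (panorama_width : Int) (window_size : Int) (stride : Int) : List (List (Int × Int × Int × Int)) :=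
  let num_blocks_height := pyCeilDiv (panorama_height - window_size) stride + 1
  let num_blocks_width := pyCeilDiv (panorama_width - window_size) stride + 1
  -- first row at h = 0
  let row0 := (PySem.List.pyRange 0 num_blocks_width 1).map
    (fun j => ((0 : Int), window_size, j * stride, j * stride + window_size))
  -- loop state: (views so far, current row); each step appends the row and shifts it by stride
  ((PySem.List.pyRange 0 num_blocks_height 1).foldl
    (fun (s : List (List (Int × Int × Int × Int)) × List (Int × Int × Int × Int)) _ =>
      (s.1 ++ [s.2], s.2.map (fun t => (t.1 + stride, t.2.1 + stride, t.2.2.1, t.2.2.2))))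
    ([], row0)).1

-- ===== PRECONDITION & SPEC =====
-- A raises ZeroDivisionError when stride = 0; that is the only exception.
def Pre_get_views (panorama_height : Int) (panorama_width : Int) (window_size : Int) (stride : Int) : Prop := stride ≠ 0
instance (panorama_height : Int) (panorama_width : Int) (window_size : Int) (stride : Int) : Decidable (Pre_get_views panorama_height panorama_width window_size stride) := by unfold Pre_get_views; infer_instance
def pvWitness_get_views : Int × Int × Int × Int := (100, 100, 64, 32)

def Spec_get_views (panorama_height : Int) (panorama_width : Int) (window_size : Int) (stride : Int) (out : List (List (Int × Int × Int × Int))) : Prop := out = get_views_alt panorama_height panorama_width window_size stride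
instance (panorama_height : Int) (panorama_width : Int) (window_size : Int) (stride : Int) (out : List (List (Int × Int × Int × Int))) : Decidable (Spec_get_views panorama_height panorama_width window_size stride out) := by unfold Spec_get_views; infer_instance

-- ===== CLAIM (what is proved, stated in full; the proofs are below) =====
def Claim_equal_get_views : Prop := ∀ (panorama_height : Int) (panorama_width : Int) (window_size : Int) (stride : Int), Dom_get_views panorama_height panorama_width window_size stride → Pre_get_views panorama_height panorama_width window_size stride → Spec_get_views panorama_height panorama_width window_size stride (get_views panorama_height panorama_width window_size stride)

-- ===== LEMMAS AND PROOFS =====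

-- the row whose top edge is at height k*st (proof-only abbreviation)
def pvRowOf (ws st nw : Int) (k : Int) : List (Int × Int × Int × Int) :=
  (PySem.List.pyRange 0 nw 1).map (fun j => (k * st, k * st + ws, j * st, j * st + ws))

-- A-side: inner loop appends each g j to slot i, filling slot i with the mapped list
theorem inner_fold_eq (g : Int → Int × Int × Int × Int) (i : Int) :
    ∀ (js : List Int) (v : List (List (Int × Int × Int × Int))),
      i.toNat < v.length →
      js.foldl (fun v j => pvAppendAt v i (g j)) v
        = v.set i.toNat (v.getD i.toNat [] ++ js.map g) := by
  intro js
  induction js with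
  | nil =>
      intro v hv
      simp [List.getD, List.getElem?_eq_getElem hv, List.set_getElem_self]
  | cons j js ih =>
      intro v hv
      simp only [List.foldl_cons, List.map_cons]
      rw [ih _ (by simpa [pvAppendAt] using hv)]
      simp [pvAppendAt, List.getD, List.getElem?_set_self' , List.getElem?_eq_getElem hv,
        List.set_set]

-- A-side: outer loop on a Nat-length range, generalized over a suffix of untouched slots
theorem outer_fold_eq (ws st nw : Int) :
    ∀ (n : Nat) (suffix : List (List (Int × Int × Int × Int))),
      (PySem.List.pyRange 0 (n : Int) 1).foldl (fun v i =>
          (PySem.List.pyRange 0 nw 1).foldl (fun v j =>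
            pvAppendAt v i (i * st, i * st + ws, j * st, j * st + ws)) v)
        (List.replicate n ([] : List (Int × Int × Int × Int)) ++ suffix)
        = (PySem.List.pyRange 0 (n : Int) 1).map (fun i =>
            (PySem.List.pyRange 0 nw 1).map (fun j => (i * st, i * st + ws, j * st, j * st + ws)))
          ++ suffix := by
  intro n
  induction n with
  | zero => intro suffix; simp [PySem.List.pyRange_one_eq_nil]
  | succ n ih =>
      intro suffix
      have hsplit : PySem.List.pyRange 0 ((n : Int) + 1) 1
          = PySem.List.pyRange 0 (n : Int) 1 ++ [(n : Int)] :=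
        PySem.List.pyRange_one_succ_right (by exact_mod_cast Nat.zero_le n)
      have hrep : List.replicate (n + 1) ([] : List (Int × Int × Int × Int)) ++ suffix
          = List.replicate n ([] : List (Int × Int × Int × Int)) ++ ([] :: suffix) := by
        simp [List.replicate_succ']
      push_cast
      rw [hsplit, List.foldl_append, List.map_append, hrep, ih ([] :: suffix)]
      have hlen : ((n : Int)).toNat <
          ((PySem.List.pyRange 0 (n : Int) 1).map (fun i =>
            (PySem.List.pyRange 0 nw 1).map (fun j => (i * st, i * st + ws, j * st, j * st + ws)))
            ++ ([] :: suffix)).length := by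
        simp [PySem.List.length_pyRange_one]
      simp only [List.foldl_cons, List.foldl_nil]
      rw [inner_fold_eq _ _ _ _ hlen]
      have hn : ((n : Int)).toNat
          = ((PySem.List.pyRange 0 (n : Int) 1).map (fun i =>
              (PySem.List.pyRange 0 nw 1).map (fun j => (i * st, i * st + ws, j * st, j * st + ws)))).length := by
        simp [PySem.List.length_pyRange_one]
      rw [List.getD, hn, List.getElem?_append_right (le_refl _)]
      simp

-- B-side: shifting a row by st moves its top edge from k*st to (k+1)*st
theorem shift_rowOf (ws st nw k : Int) :
    (pvRowOf ws st nw k).map (fun t => (t.1 + st, t.2.1 + st, t.2.2.1, t.2.2.2))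
      = pvRowOf ws st nw (k + 1) := by
  unfold pvRowOf
  simp only [List.map_map]
  apply List.map_congr_left
  intro j _
  simp only [Function.comp]
  refine Prod.ext ?_ (Prod.ext ?_ rfl) <;> simp <;> ring

-- B-side: the fold characterization, generalized over accumulator and start row
theorem b_fold_eq (ws st nw : Int) :
    ∀ (l : List Int) (acc : List (List (Int × Int × Int × Int))) (k : Int),
      (l.foldl
        (fun (s : List (List (Int × Int × Int × Int)) × List (Int × Int × Int × Int)) _ =>
          (s.1 ++ [s.2], s.2.map (fun t => (t.1 + st, t.2.1 + st, t.2.2.1, t.2.2.2))))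
        (acc, pvRowOf ws st nw k)).1
      = acc ++ (List.range l.length).map (fun m : Nat => pvRowOf ws st nw (k + (m : Int))) := by
  intro l
  induction l with
  | nil => intro acc k; simp
  | cons x xs ih =>
      intro acc k
      simp only [List.foldl_cons]
      rw [shift_rowOf, ih]
      simp only [List.length_cons]
      rw [List.range_succ_eq_map]
      simp only [List.map_cons, List.map_map, List.append_assoc]
      congr 1
      simp only [List.singleton_append, Nat.cast_zero, add_zero]
      congr 1
      apply List.map_congr_left
      intro m _
      simp only [Function.comp, Nat.succ_eq_add_one]
      push_cast
      ring_nf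

theorem get_views_spec : Claim_equal_get_views := by
  intro ph pw ws st _ _
  unfold Spec_get_views get_views get_views_alt
  dsimp only
  set nh := pyCeilDiv (ph - ws) st + 1 with hnh
  set nw := pyCeilDiv (pw - ws) st + 1 with hnw
  have hrow0 : (PySem.List.pyRange 0 nw 1).map
      (fun j => ((0 : Int), ws, j * st, j * st + ws)) = pvRowOf ws st nw 0 := by
    unfold pvRowOf; simp
  rw [hrow0, b_fold_eq ws st nw (PySem.List.pyRange 0 nh 1) [] 0]
  by_cases h : nh ≤ 0
  · simp [PySem.List.pyRange_one_eq_nil h]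
  · have h0 : (0:Int) ≤ nh := le_of_lt (lt_of_not_ge h)
    have hcast : ((nh.toNat : Nat) : Int) = nh := Int.toNat_of_nonneg h0
    -- left side: A's fold equals the doubly-mapped grid
    have hmapconst : (PySem.List.pyRange 0 nh 1).map
        (fun _ => ([] : List (Int × Int × Int × Int)))
        = List.replicate nh.toNat ([] : List (Int × Int × Int × Int)) := by
      rw [List.map_const']
      simp [PySem.List.length_pyRange_one]
    rw [hmapconst]
    have hA := outer_fold_eq ws st nw nh.toNat ([])
    rw [hcast] at hA
    rw [List.append_nil] at hA
    rw [hA, List.append_nil]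
    -- both sides are maps over the same index set
    have hidx : ∀ (f : Int → List (Int × Int × Int × Int)),
        (PySem.List.pyRange 0 nh 1).map f
          = (List.range (PySem.List.pyRange 0 nh 1).length).map (fun m : Nat => f (m : Int)) := by
      intro f
      rw [PySem.List.pyRange_one]
      simp [List.map_map, Function.comp_def]
    rw [hidx]
    apply List.map_congr_left
    intro m _
    unfold pvRowOf
    simp
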